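-- pv_equiv track=rewrite | github.com/Afridshariff/github-upload | main.py | RemoveSingleElement
-- ===== SOURCE A (Python) =====
-- def RemoveSingleElement(l):
--     if len(l)<=1:
--         return []
--     tempItem = l[0]
--     count = 0
--     indexes = list()
--     for i in range(1, len(l)):
--         if l[i] == tempItem:
--             count += 1
--         else:
--             if count < 1:
--                 indexes.append(i-1)
--             tempItem = l[i]
--             count = 0
--
--     if count == 0:
--         indexes.append(i)
--     x = 0
--     for i in indexes:
--         del l[i-x]
--         x += 1
--     return l
-- ===== SOURCE B (Python) =====
-- def RemoveSingleElement(l):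
--     if len(l) <= 1:
--         return []
--     kept = []
--     n = len(l)
--     i = 0
--     while i < n:
--         j = i + 1
--         while j < n and l[j] == l[i]:
--             j += 1
--         if j - i >= 2:
--             kept.extend(l[i:j])
--         i = j
--     l[:] = kept
--     return l
-- ===== Notes on version B (the rewrite author's own statement) =====
-- stated objective: alternative
-- what changed: B scans runs of equal elements once and rebuilds the kept list, instead of A's count-tracking pass that collects singleton indexes and then deletes them from the list one by one with del.
import Mathlib
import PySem

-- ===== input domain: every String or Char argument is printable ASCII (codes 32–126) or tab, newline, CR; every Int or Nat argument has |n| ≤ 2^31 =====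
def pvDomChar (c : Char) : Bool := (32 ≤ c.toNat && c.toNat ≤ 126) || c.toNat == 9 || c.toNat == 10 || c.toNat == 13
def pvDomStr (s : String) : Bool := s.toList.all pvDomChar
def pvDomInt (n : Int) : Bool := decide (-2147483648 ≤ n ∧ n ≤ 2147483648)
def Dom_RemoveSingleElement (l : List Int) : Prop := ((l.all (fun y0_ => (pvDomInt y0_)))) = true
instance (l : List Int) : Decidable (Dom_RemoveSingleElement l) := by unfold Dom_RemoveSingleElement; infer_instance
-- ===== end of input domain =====

-- B replaces A's singleton-index collection plus one-by-one `del` with a single run-scanning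
-- pass that rebuilds the kept list. Both Pythons mutate the argument list in place to the same
-- final contents; the theorems below are about the return value.

-- ===== PORT A =====
-- A-side helper: one `del l[i-x]; x += 1` step of A's deletion loop (the `none` branch is a
-- totality guard only: on A's inputs the deleted index is always in range, so Python never raises).
def pvDelStep (acc : List Int × Int) (i : Int) : List Int × Int :=
  match PySem.List.pop? acc.1 (i - acc.2) with
  | some r => (r.2, acc.2 + 1)
  | none => (acc.1, acc.2 + 1)

def RemoveSingleElement (l : List Int) : List Int :=
  if l.length ≤ 1 then []
  else
    -- state (tempItem, count, indexes), loop `for i in range(1, len(l))`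
    let s := (PySem.List.pyRange 1 (l.length : Int) 1).foldl
      (fun (s : Int × Int × List Int) (i : Int) =>
        if PySem.List.pyGetD l i 0 = s.1 then (s.1, s.2.1 + 1, s.2.2)
        else (PySem.List.pyGetD l i 0, 0, if s.2.1 < 1 then s.2.2 ++ [i - 1] else s.2.2))
      (PySem.List.pyGetD l 0 0, 0, ([] : List Int))
    -- after the loop Python's `i` equals len(l)-1 (the range is nonempty since 2 ≤ len(l))
    let indexes := if s.2.1 = 0 then s.2.2 ++ [(l.length : Int) - 1] else s.2.2
    (indexes.foldl pvDelStep (l, (0 : Int))).1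

-- ===== PORT B =====
-- B-side helper: the outer `while i < n` loop of Source B, recursing on the unprocessed suffix;
-- the inner scanning `while j < n and l[j] == l[i]` is the takeWhile/dropWhile split of that
-- suffix, `kept` is the accumulator.
def pvRuns (rest kept : List Int) : List Int :=
  match rest with
  | [] => kept
  | x :: xs =>
      pvRuns (xs.dropWhile (fun y => y == x))
        (kept ++ (if (xs.takeWhile (fun y => y == x)).length + 1 ≥ 2
                  then x :: xs.takeWhile (fun y => y == x) else []))
termination_by rest.length
decreasing_by simpa using Nat.lt_succ_of_le (List.length_dropWhile_le _ _)

def RemoveSingleElement_alt (l : List Int) : List Int :=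
  if l.length ≤ 1 then [] else pvRuns l []

-- ===== PRECONDITION & SPEC =====
def Spec_RemoveSingleElement (l : List Int) (out : List Int) : Prop := out = RemoveSingleElement_alt l
instance (l : List Int) (out : List Int) : Decidable (Spec_RemoveSingleElement l out) := by unfold Spec_RemoveSingleElement; infer_instance

-- ===== CLAIM (what is proved, stated in full; the proofs are below) =====
def Claim_equal_RemoveSingleElement : Prop := ∀ (l : List Int), Dom_RemoveSingleElement l → Spec_RemoveSingleElement l (RemoveSingleElement l)

-- ===== LEMMAS AND PROOFS =====

-- cRuns: pvRuns without the accumulator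
def cRuns (rest : List Int) : List Int :=
  match rest with
  | [] => []
  | x :: xs =>
      (if (xs.takeWhile (fun y => y == x)).length + 1 ≥ 2
       then x :: xs.takeWhile (fun y => y == x) else [])
        ++ cRuns (xs.dropWhile (fun y => y == x))
termination_by rest.length
decreasing_by simpa using Nat.lt_succ_of_le (List.length_dropWhile_le _ _)

lemma pvRuns_eq_append (rest : List Int) : ∀ kept, pvRuns rest kept = kept ++ cRuns rest := by
  induction rest using cRuns.induct with
  | case1 => intro kept; simp [pvRuns, cRuns]
  | case2 x xs ih =>
      intro kept
      rw [pvRuns, cRuns, ih]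
      simp

-- pvTail: A's main-loop state evolution, written recursively (positions as Int), fused with the
-- final `if count == 0: indexes.append(i)` (at the end s = len(l), so the appended index is s-1).
def pvTail : List Int → Int → Int → Int → List Int
  | [], _, c, s => if c = 0 then [s - 1] else []
  | x :: xs, t, c, s =>
      if x = t then pvTail xs t (c + 1) (s + 1)
      else (if c < 1 then [s - 1] else []) ++ pvTail xs x 0 (s + 1)

-- pvSingles: the positions of the length-1 runs, run by run
def pvSingles : List Int → Int → List Int
  | [], _ => []
  | x :: xs, s =>
      (if (xs.takeWhile (fun y => y == x)).length = 0 then [s] else [])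
        ++ pvSingles (xs.dropWhile (fun y => y == x))
            (s + 1 + ((xs.takeWhile (fun y => y == x)).length : Int))
termination_by l => l.length
decreasing_by simpa using Nat.lt_succ_of_le (List.length_dropWhile_le _ _)

-- the indexed fold over range(a, len(l)) is the structural fold over enumerate(l[a:], a)
lemma pv_fold_idx {σ : Type} (l : List Int) (F : σ → Int → Int → σ) :
    ∀ (k a : Nat) (init : σ), l.length - a ≤ k →
    (PySem.List.pyRange (a : Int) (l.length : Int) 1).foldl
        (fun s i => F s i (PySem.List.pyGetD l i 0)) init
      = (PySem.List.enumerate (l.drop a) (a : Int)).foldl (fun s p => F s p.1 p.2) init := by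
  intro k
  induction k with
  | zero =>
      intro a init h
      have ha : l.length ≤ a := by omega
      rw [PySem.List.pyRange_one_eq_nil (by exact_mod_cast ha), List.drop_eq_nil_of_le ha]
      simp [PySem.List.enumerate]
  | succ k ih =>
      intro a init h
      by_cases ha : l.length ≤ a
      · rw [PySem.List.pyRange_one_eq_nil (by exact_mod_cast ha), List.drop_eq_nil_of_le ha]
        simp [PySem.List.enumerate]
      · have ha' : a < l.length := by omega
        rw [PySem.List.pyRange_one_cons (by exact_mod_cast ha'),
            List.drop_eq_getElem_cons ha', PySem.List.enumerate_cons]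
        simp only [List.foldl_cons]
        have hget : PySem.List.pyGetD l (a : Int) 0 = l[a] := by
          rw [PySem.List.pyGetD_natCast]; exact List.getD_eq_getElem _ _ ha'
        rw [hget]
        have := ih (a + 1) (F init (a : Int) l[a]) (by omega)
        push_cast at this ⊢
        exact this

-- A's fold, followed by the final conditional append, equals pvTail
lemma pv_E (xs : List Int) : ∀ (t c s : Int) (idx : List Int),
    (let r := (PySem.List.enumerate xs s).foldl
        (fun (a : Int × Int × List Int) (p : Int × Int) =>
          if p.2 = a.1 then (a.1, a.2.1 + 1, a.2.2)
          else (p.2, 0, if a.2.1 < 1 then a.2.2 ++ [p.1 - 1] else a.2.2)) (t, c, idx)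
     if r.2.1 = 0 then r.2.2 ++ [s + (xs.length : Int) - 1] else r.2.2)
      = idx ++ pvTail xs t c s := by
  induction xs with
  | nil =>
      intro t c s idx
      simp only [PySem.List.enumerate, List.foldl_nil, List.length_nil, pvTail]
      split <;> simp
  | cons x xs ih =>
      intro t c s idx
      rw [PySem.List.enumerate_cons]
      simp only [List.foldl_cons, pvTail]
      have h2 : s + ((x :: xs).length : Int) - 1 = (s + 1) + (xs.length : Int) - 1 := by
        push_cast [List.length_cons]; ring
      rw [h2]
      by_cases hx : x = t
      · rw [if_pos hx, if_pos hx]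
        exact ih t (c + 1) (s + 1) idx
      · rw [if_neg hx, if_neg hx]
        have hif : (if c < 1 then idx ++ [s - 1] else idx)
            = idx ++ (if c < 1 then [s - 1] else []) := by split <;> simp
        rw [hif]
        have := ih x 0 (s + 1) (idx ++ if c < 1 then [s - 1] else [])
        simp only at this
        rw [this, List.append_assoc]

-- consuming one whole run of t
lemma pv_R1 (xs : List Int) : ∀ (t c s : Int),
    pvTail xs t c s
      = pvTail (xs.dropWhile (fun y => y == t)) t
          (c + ((xs.takeWhile (fun y => y == t)).length : Int))
          (s + ((xs.takeWhile (fun y => y == t)).length : Int)) := by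
  induction xs with
  | nil => intro t c s; simp
  | cons x xs ih =>
      intro t c s
      by_cases hx : x = t
      · have hb : (x == t) = true := by simp [hx]
        rw [List.takeWhile_cons, List.dropWhile_cons]
        simp only [hb, if_true]
        rw [pvTail, if_pos hx, ih t (c + 1) (s + 1)]
        congr 1
        · push_cast [List.length_cons]; ring
        · push_cast [List.length_cons]; ring
      · have hb : (x == t) = false := by simp [hx]
        rw [List.takeWhile_cons, List.dropWhile_cons]
        simp only [hb, if_false, Bool.false_eq_true]
        simp

lemma pv_C : ∀ (n : ℕ) (xs : List Int), xs.length = n → ∀ (t s : Int),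
    pvTail xs t 0 s = pvSingles (t :: xs) (s - 1) := by
  intro n
  induction n using Nat.strong_induction_on with
  | _ n ih =>
  intro xs hn t s
  rw [pv_R1, pvSingles]
  cases hrst : xs.dropWhile (fun y => y == t) with
  | nil =>
      rw [pvTail]
      simp only [pvSingles, List.append_nil]
      by_cases h0 : (xs.takeWhile (fun y => y == t)).length = 0
      · rw [if_pos (by simp [h0]), if_pos h0]
        simp [h0]
      · rw [if_neg (by omega), if_neg h0]
  | cons y ys =>
      have hne : xs.dropWhile (fun y => y == t) ≠ [] := by rw [hrst]; simp
      have hy : ¬ (y = t) := by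
        have hhead := List.head_dropWhile_not (fun y => y == t) hne
        simp only [hrst, List.head_cons] at hhead
        simpa using hhead
      rw [pvTail, if_neg hy]
      have hlen : ys.length < n := by
        have h1 := List.length_dropWhile_le (fun y => y == t) xs
        rw [hrst] at h1; simp at h1; omega
      rw [ih ys.length hlen ys rfl y (s + ((xs.takeWhile (fun y => y == t)).length : Int) + 1)]
      have harith : s + ((xs.takeWhile (fun y => y == t)).length : Int) + 1 - 1
          = s - 1 + 1 + ((xs.takeWhile (fun y => y == t)).length : Int) := by ring
      rw [harith]
      by_cases h0 : (xs.takeWhile (fun y => y == t)).length = 0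
      · rw [if_pos (by simp [h0]), if_pos h0]
        simp [h0]
      · rw [if_neg (by omega), if_neg h0]

-- pop at the length of the prefix
lemma pv_pop_prefix (kept : List Int) (t : Int) (u : List Int) :
    PySem.List.pop? (kept ++ t :: u) ((kept.length : Int)) = some (t, kept ++ u) := by
  have herase : (kept ++ t :: u).eraseIdx kept.length = kept ++ u := by
    induction kept with
    | nil => simp
    | cons k ks ih => simpa [List.eraseIdx] using ih
  have h := PySem.List.pop?_natCast (kept ++ t :: u) kept.length (by simp)
  rw [h, herase]
  simp

-- the deletion loop applied to the singleton-run positions produces cRuns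
lemma pv_D1 : ∀ (n : ℕ) (u : List Int), u.length = n → ∀ (t : Int) (kept : List Int) (x : ℕ),
    ((pvSingles (t :: u) ((kept.length + x : ℕ) : Int)).foldl pvDelStep (kept ++ t :: u, (x : Int))).1
      = kept ++ cRuns (t :: u) := by
  intro n
  induction n using Nat.strong_induction_on with
  | _ n ih =>
  intro u hn t kept x
  rw [pvSingles, cRuns]
  by_cases h0 : (u.takeWhile (fun y => y == t)).length = 0
  · -- a singleton run of t: the element at position kept.length + x is deleted
    have hrnil : u.takeWhile (fun y => y == t) = [] := List.length_eq_zero_iff.mp h0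
    have hru : u.dropWhile (fun y => y == t) = u := by
      rw [List.dropWhile_eq_self_iff]
      intro hl
      have := List.takeWhile_eq_nil_iff.mp hrnil
      simpa using this hl
    rw [if_pos h0, if_neg (by omega), hru, h0]
    simp only [List.nil_append, List.singleton_append, List.foldl_cons]
    have hstep : pvDelStep (kept ++ t :: u, (x : Int)) ((kept.length + x : ℕ) : Int)
        = (kept ++ u, (x : Int) + 1) := by
      unfold pvDelStep
      have harg : ((kept.length + x : ℕ) : Int) - (x : Int) = ((kept.length : ℕ) : Int) := by
        push_cast; ring
      rw [harg, pv_pop_prefix]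
    rw [hstep]
    cases hu : u with
    | nil => simp [pvSingles, cRuns]
    | cons y ys =>
        have hlen : ys.length < n := by rw [← hn, hu]; simp
        have hih := ih ys.length hlen ys rfl y kept (x + 1)
        have hpos : ((kept.length + x : ℕ) : Int) + 1 + ((0:ℕ) : Int)
            = ((kept.length + (x + 1) : ℕ) : Int) := by push_cast; ring
        have hx1 : ((x : ℕ) : Int) + 1 = (((x + 1 : ℕ)) : Int) := by push_cast; ring
        rw [hpos, hx1, hih]
  · -- a run of length ≥ 2: kept, deletion state unchanged
    rw [if_neg h0, if_pos (by omega)]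
    simp only [List.nil_append]
    have hsplit : u.takeWhile (fun y => y == t) ++ u.dropWhile (fun y => y == t) = u :=
      List.takeWhile_append_dropWhile
    cases hrst : u.dropWhile (fun y => y == t) with
    | nil =>
        rw [hrst, List.append_nil] at hsplit
        simp [pvSingles, cRuns, hsplit]
    | cons y ys =>
        have hlen : ys.length < n := by
          have h1 := List.length_dropWhile_le (fun y => y == t) u
          rw [hrst] at h1; simp at h1; omega
        have hih := ih ys.length hlen ys rfl y (kept ++ t :: u.takeWhile (fun y => y == t)) x
        have hpos : (((kept ++ t :: u.takeWhile (fun y => y == t)).length + x : ℕ) : Int)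
            = ((kept.length + x : ℕ) : Int) + 1 + ((u.takeWhile (fun y => y == t)).length : Int) := by
          simp only [List.length_append, List.length_cons]
          push_cast; ring
        have hacc : kept ++ t :: u = (kept ++ t :: u.takeWhile (fun y => y == t)) ++ y :: ys := by
          conv_lhs => rw [← hsplit]
          rw [hrst]
          simp
        rw [← hpos, hacc, hih]
        simp

lemma pv_main (h h2 : Int) (u' : List Int) :
    RemoveSingleElement (h :: h2 :: u') = RemoveSingleElement_alt (h :: h2 :: u') := by
  have hl : ¬ ((h :: h2 :: u').length ≤ 1) := by simp
  rw [RemoveSingleElement, RemoveSingleElement_alt, if_neg hl, if_neg hl]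
  simp only []
  -- phase 1: the indexed fold over range(1, len l) as a fold over enumerate(l[1:], 1)
  have h1 := pv_fold_idx (σ := Int × Int × List Int) (h :: h2 :: u')
    (fun s i x => if x = s.1 then (s.1, s.2.1 + 1, s.2.2)
                  else (x, 0, if s.2.1 < 1 then s.2.2 ++ [i - 1] else s.2.2))
    (h :: h2 :: u').length 1
    (PySem.List.pyGetD (h :: h2 :: u') 0 0, 0, ([] : List Int)) (by omega)
  simp only [Nat.cast_one] at h1
  rw [h1]
  -- phase 1 + the final conditional append: pvTail
  have hE := pv_E (h2 :: u') h 0 1 []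
  simp only [List.nil_append] at hE
  have hidx : (1 : Int) + ((h2 :: u').length : Int) - 1 = ((h :: h2 :: u').length : Int) - 1 := by
    push_cast [List.length_cons]; ring
  rw [hidx] at hE
  rw [List.drop_succ_cons, List.drop_zero, PySem.List.pyGetD_zero_cons, hE]
  -- the singleton-run positions
  rw [pv_C (h2 :: u').length (h2 :: u') rfl h 1]
  norm_num
  -- the deletion loop: cRuns
  have hD := pv_D1 (h2 :: u').length (h2 :: u') rfl h [] 0
  simp only [List.length_nil, List.nil_append, Nat.add_zero, Nat.cast_zero] at hD
  rw [hD, pvRuns_eq_append]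
  simp

-- ===== VERDICT (by name: the statement is the Claim_ definition above) =====
theorem RemoveSingleElement_spec : Claim_equal_RemoveSingleElement := by
  unfold Claim_equal_RemoveSingleElement
  intro l _
  unfold Spec_RemoveSingleElement
  match l with
  | [] => rfl
  | [a] => rfl
  | h :: h2 :: u' => exact pv_main h h2 u'
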